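-- pv_equiv track=rewrite | github.com/jasonyux/VAGEN | vagen/env/osworld/render_utils.py | _process_raw_action_for_html
-- ===== SOURCE A (Python) =====
-- def _process_raw_action_for_html(raw_response_str: str):
--     special_word_replacement = {
--         "<think>": "&lt;think&gt;",
--         "</think>": "&lt;/think&gt;",
--         "<action>": "&lt;action&gt;",
--         "</action>": "&lt;/action&gt;",
--         "<simulate>": "&lt;simulate&gt;",
--         "</simulate>": "&lt;/simulate&gt;",
--     }
--     for k, v in special_word_replacement.items():
--         raw_response_str = raw_response_str.replace(k, v)
--     return raw_response_str
-- ===== SOURCE B (Python) =====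
-- def _process_raw_action_for_html(raw_response_str: str):
--     special_word_replacement = {
--         f"<{slash}{name}>": f"&lt;{slash}{name}&gt;"
--         for name in ("think", "action", "simulate")
--         for slash in ("", "/")
--     }
--     out = []
--     i = 0
--     n = len(raw_response_str)
--     while i < n:
--         if raw_response_str[i] == "<":
--             for tag, esc in special_word_replacement.items():
--                 if raw_response_str.startswith(tag, i):
--                     out.append(esc)
--                     i += len(tag)
--                     break
--             else:
--                 out.append(raw_response_str[i])
--                 i += 1
--         else:
--             out.append(raw_response_str[i])
--             i += 1
--     return "".join(out)
-- ===== Notes on version B (the rewrite author's own statement) =====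
-- stated objective: alternative
-- what changed: Replaces A's six sequential full-string str.replace passes by one left-to-right scan that, at each position where a tag begins, emits the tag's escaped form and skips it, joining the pieces at the end.
import Mathlib
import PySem

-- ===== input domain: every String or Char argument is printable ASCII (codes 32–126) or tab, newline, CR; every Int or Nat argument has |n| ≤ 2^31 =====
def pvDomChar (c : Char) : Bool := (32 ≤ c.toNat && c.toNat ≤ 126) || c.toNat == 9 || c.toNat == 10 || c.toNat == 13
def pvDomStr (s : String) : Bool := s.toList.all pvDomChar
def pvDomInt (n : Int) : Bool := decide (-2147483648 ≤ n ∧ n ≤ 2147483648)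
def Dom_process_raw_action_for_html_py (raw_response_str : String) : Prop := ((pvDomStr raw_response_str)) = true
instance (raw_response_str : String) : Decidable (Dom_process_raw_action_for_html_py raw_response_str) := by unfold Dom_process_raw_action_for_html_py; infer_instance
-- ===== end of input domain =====

-- B replaces A's six sequential full-string str.replace passes by one left-to-right scan
-- that escapes whichever of the six tags begins at the current position (objective: alternative).

-- ===== PORT A =====
def process_raw_action_for_html_py (raw_response_str : String) : String :=
  let s1 := PySem.Str.replace raw_response_str "<think>" "&lt;think&gt;"
  let s2 := PySem.Str.replace s1 "</think>" "&lt;/think&gt;"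
  let s3 := PySem.Str.replace s2 "<action>" "&lt;action&gt;"
  let s4 := PySem.Str.replace s3 "</action>" "&lt;/action&gt;"
  let s5 := PySem.Str.replace s4 "<simulate>" "&lt;simulate&gt;"
  let s6 := PySem.Str.replace s5 "</simulate>" "&lt;/simulate&gt;"
  s6

-- ===== PORT B =====
-- the (tag, escaped form) pairs of Source B's comprehension-built table, in its iteration order
def pvTags : List (List Char × List Char) :=
  [("<think>".toList, "&lt;think&gt;".toList),
   ("</think>".toList, "&lt;/think&gt;".toList),
   ("<action>".toList, "&lt;action&gt;".toList),
   ("</action>".toList, "&lt;/action&gt;".toList),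
   ("<simulate>".toList, "&lt;simulate&gt;".toList),
   ("</simulate>".toList, "&lt;/simulate&gt;".toList)]

-- Source B's single while-loop: at each position, if the char is '<', try the six tags
def pvScan : List Char → List Char
  | [] => []
  | c :: t =>
    if c = '<' then
      match pvTags.find? (fun p => p.1.isPrefixOf (c :: t)) with
      | some (tag, esc) => esc ++ pvScan (t.drop (tag.length - 1))
      | none => c :: pvScan t
    else c :: pvScan t
termination_by s => s.length
decreasing_by
  all_goals simp [List.length_drop]

def process_raw_action_for_html_py_alt (raw_response_str : String) : String :=
  String.ofList (pvScan raw_response_str.toList)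

-- ===== PRECONDITION & SPEC =====
def Spec_process_raw_action_for_html_py (raw_response_str : String) (out : String) : Prop := out = process_raw_action_for_html_py_alt raw_response_str
instance (raw_response_str : String) (out : String) : Decidable (Spec_process_raw_action_for_html_py raw_response_str out) := by unfold Spec_process_raw_action_for_html_py; infer_instance

-- ===== CLAIM (what is proved, stated in full; the proofs are below) =====
def Claim_equal_process_raw_action_for_html_py : Prop := ∀ (raw_response_str : String), Dom_process_raw_action_for_html_py raw_response_str → Spec_process_raw_action_for_html_py raw_response_str (process_raw_action_for_html_py raw_response_str)

-- ===== LEMMAS AND PROOFS =====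

-- proof-side fuel/accumulator-free clone of PySem.Chars.replace
def pvRep (old new : List Char) : List Char → List Char
  | [] => []
  | c :: t =>
    if old <+: (c :: t) then new ++ pvRep old new (t.drop (old.length - 1))
    else c :: pvRep old new t
termination_by l => l.length
decreasing_by
  all_goals simp [List.length_drop]

theorem pvRep_nil (old new : List Char) : pvRep old new [] = [] := by
  simp [pvRep]

theorem pvRep_pos (old new : List Char) (c : Char) (t : List Char) (h : old <+: c :: t) :
    pvRep old new (c :: t) = new ++ pvRep old new (t.drop (old.length - 1)) := by
  simp only [pvRep]
  rw [if_pos h]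

theorem pvRep_neg (old new : List Char) (c : Char) (t : List Char) (h : ¬ old <+: c :: t) :
    pvRep old new (c :: t) = c :: pvRep old new t := by
  simp only [pvRep]
  rw [if_neg h]

-- PySem.Chars.replace.go with enough fuel computes pvRep
theorem pvGo_eq (old new : List Char) (hold : old ≠ []) :
    ∀ (fuel : Nat) (l acc : List Char), l.length ≤ fuel →
      PySem.Chars.replace.go old new fuel l acc = acc.reverse ++ pvRep old new l := by
  intro fuel
  induction fuel with
  | zero =>
    intro l acc h
    have hl : l = [] := List.eq_nil_of_length_eq_zero (Nat.le_zero.mp h)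
    subst hl
    simp [PySem.Chars.replace.go, pvRep_nil]
  | succ f ih =>
    intro l acc h
    cases l with
    | nil => simp [PySem.Chars.replace.go, pvRep_nil]
    | cons c t =>
      obtain ⟨o, os, rfl⟩ : ∃ o os, old = o :: os := by
        cases old with
        | nil => exact absurd rfl hold
        | cons o os => exact ⟨o, os, rfl⟩
      simp only [PySem.Chars.replace.go]
      by_cases hb : (o :: os).isPrefixOf (c :: t) = true
      · rw [if_pos hb]
        have hp : (o :: os) <+: (c :: t) := List.isPrefixOf_iff_prefix.mp hb
        have hdrop : List.drop (o :: os).length (c :: t) = t.drop ((o :: os).length - 1) := by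
          simp
        have hlen : (t.drop ((o :: os).length - 1)).length ≤ f := by
          simp only [List.length_drop]
          simp only [List.length_cons] at h
          omega
        rw [hdrop, ih _ _ hlen, pvRep_pos _ _ _ _ hp]
        simp
      · rw [if_neg hb]
        have hp : ¬ (o :: os) <+: (c :: t) := fun hh => hb (List.isPrefixOf_iff_prefix.mpr hh)
        have hlen : t.length ≤ f := by simp only [List.length_cons] at h; omega
        rw [ih _ _ hlen, pvRep_neg _ _ _ _ hp]
        simp

theorem pvReplace_eq (l old new : List Char) (hold : old ≠ []) :
    PySem.Chars.replace l old new = pvRep old new l := by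
  rw [PySem.Chars.replace]
  rw [if_neg (by simpa [List.isEmpty_iff] using hold)]
  rw [pvGo_eq old new hold l.length l [] (le_refl _)]
  simp

-- pvRep walks over a block containing no '<' unchanged (every tag starts with '<')
theorem pvRep_skip (old new : List Char) (hh : old.head? = some '<') :
    ∀ (p y : List Char), '<' ∉ p → pvRep old new (p ++ y) = p ++ pvRep old new y := by
  intro p
  induction p with
  | nil => intro y _; simp
  | cons c p' ih =>
    intro y hp
    obtain ⟨os, rfl⟩ : ∃ os, old = '<' :: os := by
      cases old with
      | nil => simp at hh
      | cons o os =>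
        have : o = '<' := by simpa using hh
        exact ⟨os, by rw [this]⟩
    have hc : c ≠ '<' := fun h => hp (by simp [h])
    have hnp : ¬ ('<' :: os) <+: (c :: (p' ++ y)) := by
      intro hpre
      exact hc (List.cons_prefix_cons.mp hpre).1.symm
    rw [List.cons_append, pvRep_neg _ _ _ _ hnp, ih y (fun h => hp (List.mem_cons_of_mem _ h))]
    rfl

-- pvRep never creates an '&'-free prefix: every escape it inserts starts with '&'
theorem pvRep_nocreate (old new : List Char) (hnew : new.head? = some '&') :
    ∀ (n : Nat) (y : List Char), y.length ≤ n → ∀ u, u ≠ [] → '&' ∉ u →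
      u <+: pvRep old new y → u <+: y := by
  intro n
  induction n with
  | zero =>
    intro y hy u hu _ hpre
    have : y = [] := List.eq_nil_of_length_eq_zero (Nat.le_zero.mp hy)
    subst this
    rw [pvRep_nil] at hpre
    exact absurd (List.prefix_nil.mp hpre) hu
  | succ n ih =>
    intro y hy u hu hamp hpre
    cases y with
    | nil =>
      rw [pvRep_nil] at hpre
      exact absurd (List.prefix_nil.mp hpre) hu
    | cons c t =>
      by_cases hp : old <+: (c :: t)
      · rw [pvRep_pos _ _ _ _ hp] at hpre
        obtain ⟨ns, rfl⟩ : ∃ ns, new = '&' :: ns := by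
          cases new with
          | nil => simp at hnew
          | cons a ns =>
            have : a = '&' := by simpa using hnew
            exact ⟨ns, by rw [this]⟩
        cases u with
        | nil => exact absurd rfl hu
        | cons u0 us =>
          rw [List.cons_append] at hpre
          have h1 := (List.cons_prefix_cons.mp hpre).1
          exact absurd (by simp [h1]) hamp
      · rw [pvRep_neg _ _ _ _ hp] at hpre
        cases u with
        | nil => exact absurd rfl hu
        | cons u0 us =>
          obtain ⟨h1, h2⟩ := List.cons_prefix_cons.mp hpre
          subst h1
          cases us with
          | nil => exact List.cons_prefix_cons.mpr ⟨rfl, List.nil_prefix⟩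
          | cons v vs =>
            have hlen : t.length ≤ n := by simp only [List.length_cons] at hy; omega
            have hmem : '&' ∉ (v :: vs) := fun h => hamp (List.mem_cons_of_mem _ h)
            have : (v :: vs) <+: t := ih t hlen (v :: vs) (by simp) hmem h2
            exact List.cons_prefix_cons.mpr ⟨rfl, this⟩

-- the shape facts about the six (tag, escape) pairs, checked by computation
theorem pvTags_shape : ∀ p ∈ pvTags,
    p.1.head? = some '<' ∧ p.1.tail ≠ [] ∧ '<' ∉ p.1.tail ∧ '&' ∉ p.1 ∧
    p.2.head? = some '&' ∧ '<' ∉ p.2 := by decide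

theorem pvTags_antiprefix : ∀ p ∈ pvTags, ∀ q ∈ pvTags, p.1 <+: q.1 → p.1 = q.1 := by decide

-- A's whole pass = folding pvRep over a pair list
def pvChain (ps : List (List Char × List Char)) (l : List Char) : List Char :=
  ps.foldl (fun acc p => pvRep p.1 p.2 acc) l

theorem pvChain_nil (ps : List (List Char × List Char)) : pvChain ps [] = [] := by
  induction ps with
  | nil => rfl
  | cons p ps ih =>
    show pvChain ps (pvRep p.1 p.2 []) = []
    rw [pvRep_nil]
    exact ih

-- if no tag matches at the head, the whole chain steps over one character
theorem pvChain_step (ps : List (List Char × List Char))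
    (hps : ∀ p ∈ ps, p.1.head? = some '<' ∧ p.1.tail ≠ [] ∧ '<' ∉ p.1.tail ∧ '&' ∉ p.1 ∧
      p.2.head? = some '&' ∧ '<' ∉ p.2) :
    ∀ (c : Char) (t : List Char), (∀ p ∈ ps, ¬ p.1 <+: c :: t) →
      pvChain ps (c :: t) = c :: pvChain ps t := by
  induction ps with
  | nil => intro c t _; rfl
  | cons p ps' ih =>
    intro c t hno
    have hshape := hps p (by simp)
    have h1 : pvRep p.1 p.2 (c :: t) = c :: pvRep p.1 p.2 t :=
      pvRep_neg _ _ _ _ (hno p (by simp))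
    have hps' : ∀ q ∈ ps', q.1.head? = some '<' ∧ q.1.tail ≠ [] ∧ '<' ∉ q.1.tail ∧ '&' ∉ q.1 ∧
        q.2.head? = some '&' ∧ '<' ∉ q.2 := fun q hq => hps q (by simp [hq])
    have hno' : ∀ q ∈ ps', ¬ q.1 <+: c :: pvRep p.1 p.2 t := by
      intro q hq hpre
      obtain ⟨hqh, hqt, _, hqamp, _, _⟩ := hps' q hq
      cases hq1 : q.1 with
      | nil => rw [hq1] at hqh; simp at hqh
      | cons q0 qs =>
        rw [hq1] at hpre
        obtain ⟨hq0, hqs⟩ := List.cons_prefix_cons.mp hpre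
        have hqs_nil : qs ≠ [] := by rw [hq1] at hqt; simpa using hqt
        have hqs_amp : '&' ∉ qs := by
          rw [hq1] at hqamp
          exact fun h => hqamp (List.mem_cons_of_mem _ h)
        have : qs <+: t :=
          pvRep_nocreate p.1 p.2 hshape.2.2.2.2.1 t.length t (le_refl _) qs hqs_nil hqs_amp hqs
        exact hno q (by simp [hq]) (by rw [hq1, hq0]; exact List.cons_prefix_cons.mpr ⟨rfl, this⟩)
    calc pvChain (p :: ps') (c :: t) = pvChain ps' (pvRep p.1 p.2 (c :: t)) := rfl
      _ = pvChain ps' (c :: pvRep p.1 p.2 t) := by rw [h1]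
      _ = c :: pvChain ps' (pvRep p.1 p.2 t) := ih hps' c (pvRep p.1 p.2 t) hno'
      _ = c :: pvChain (p :: ps') t := rfl

-- the chain passes an unmatched full tag through unchanged
theorem pvChain_pass_tag (ps : List (List Char × List Char))
    (hps : ∀ p ∈ ps, p.1.head? = some '<')
    (w : List Char) (hwh : w.head? = some '<') (hwt : '<' ∉ w.tail)
    (hnp : ∀ p ∈ ps, ¬ p.1 <+: w ∧ ¬ w <+: p.1) :
    ∀ x, pvChain ps (w ++ x) = w ++ pvChain ps x := by
  induction ps with
  | nil => intro x; rfl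
  | cons p ps' ih =>
    intro x
    obtain ⟨w0, w', rfl⟩ : ∃ w0 w', w = w0 :: w' := by
      cases w with
      | nil => simp at hwh
      | cons a b => exact ⟨a, b, rfl⟩
    have hnot : ¬ p.1 <+: (w0 :: w') ++ x := by
      intro hpre
      rcases List.prefix_or_prefix_of_prefix hpre (List.prefix_append (w0 :: w') x) with h | h
      · exact (hnp p (by simp)).1 h
      · exact (hnp p (by simp)).2 h
    have step : pvRep p.1 p.2 ((w0 :: w') ++ x) = (w0 :: w') ++ pvRep p.1 p.2 x := by
      rw [List.cons_append, pvRep_neg _ _ _ _ (by rw [← List.cons_append]; exact hnot)]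
      rw [pvRep_skip p.1 p.2 (hps p (by simp)) w' x (by simpa using hwt)]
      rfl
    calc pvChain (p :: ps') ((w0 :: w') ++ x) = pvChain ps' (pvRep p.1 p.2 ((w0 :: w') ++ x)) := rfl
      _ = pvChain ps' ((w0 :: w') ++ pvRep p.1 p.2 x) := by rw [step]
      _ = (w0 :: w') ++ pvChain ps' (pvRep p.1 p.2 x) :=
          ih (fun q hq => hps q (by simp [hq])) (fun q hq => hnp q (by simp [hq])) _
      _ = (w0 :: w') ++ pvChain (p :: ps') x := rfl

-- the chain passes an emitted escape ('<'-free) through unchanged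
theorem pvChain_pass_esc (ps : List (List Char × List Char))
    (hps : ∀ p ∈ ps, p.1.head? = some '<')
    (v : List Char) (hv : '<' ∉ v) :
    ∀ x, pvChain ps (v ++ x) = v ++ pvChain ps x := by
  induction ps with
  | nil => intro x; rfl
  | cons p ps' ih =>
    intro x
    calc pvChain (p :: ps') (v ++ x) = pvChain ps' (pvRep p.1 p.2 (v ++ x)) := rfl
      _ = pvChain ps' (v ++ pvRep p.1 p.2 x) := by
          rw [pvRep_skip p.1 p.2 (hps p (by simp)) v x hv]
      _ = v ++ pvChain ps' (pvRep p.1 p.2 x) := ih (fun q hq => hps q (by simp [hq])) _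
      _ = v ++ pvChain (p :: ps') x := rfl

-- main invariant: A's six-pass chain equals B's single scan
theorem pvMain : ∀ (n : Nat) (l : List Char), l.length ≤ n → pvChain pvTags l = pvScan l := by
  intro n
  induction n with
  | zero =>
    intro l hl
    have : l = [] := List.eq_nil_of_length_eq_zero (Nat.le_zero.mp hl)
    subst this
    rw [pvChain_nil]
    simp only [pvScan]
  | succ n ih =>
    intro l hl
    cases l with
    | nil => rw [pvChain_nil]; simp only [pvScan]
    | cons c t =>
      cases hf : pvTags.find? (fun p => p.1.isPrefixOf (c :: t)) with
      | none =>
        have hno : ∀ p ∈ pvTags, ¬ p.1 <+: c :: t := by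
          intro p hp hpre
          have h2 := List.find?_eq_none.mp hf p hp
          simp only [List.isPrefixOf_iff_prefix] at h2
          exact h2 hpre
        rw [pvChain_step pvTags pvTags_shape c t hno,
            ih t (by simp only [List.length_cons] at hl; omega)]
        simp only [pvScan]
        by_cases hc : c = '<'
        · subst hc
          rw [if_pos rfl, hf]
        · rw [if_neg hc]
      | some pe =>
        obtain ⟨tag, esc⟩ := pe
        rcases List.find?_eq_some_iff_append.mp hf with ⟨hpred, pre, post, hsplit, hpre_none⟩
        have hmem : (tag, esc) ∈ pvTags := by rw [hsplit]; simp
        have hshape := pvTags_shape (tag, esc) hmem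
        have htagpre : tag <+: c :: t := List.isPrefixOf_iff_prefix.mp hpred
        obtain ⟨tag', rfl⟩ : ∃ tag', tag = '<' :: tag' := by
          cases tag with
          | nil => simp at hshape
          | cons a b =>
            have : a = '<' := by simpa using hshape.1
            exact ⟨b, by rw [this]⟩
        have hc : c = '<' := (List.cons_prefix_cons.mp htagpre).1.symm
        obtain ⟨rest, hrest⟩ := (List.cons_prefix_cons.mp htagpre).2
        have hct : (c :: t) = ('<' :: tag') ++ rest := by rw [hc, ← hrest]; rfl
        have hdrop : t.drop (('<' :: tag').length - 1) = rest := by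
          rw [← hrest]; simp
        have hchain_split : ∀ y, pvChain pvTags y =
            pvChain post (pvRep ('<' :: tag') esc (pvChain pre y)) := by
          intro y
          rw [hsplit]
          simp [pvChain, List.foldl_append]
        have hpre_mem : ∀ p ∈ pre, p ∈ pvTags := by
          intro p hp; rw [hsplit]; simp [hp]
        have hnp_pre : ∀ p ∈ pre, ¬ p.1 <+: ('<' :: tag') ∧ ¬ ('<' :: tag') <+: p.1 := by
          intro p hp
          have hnotpre : ¬ p.1 <+: c :: t := fun hpre => by
            have h2 := hpre_none p hp
            simp [List.isPrefixOf_iff_prefix.mpr hpre] at h2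
          constructor
          · exact fun h => hnotpre (h.trans htagpre)
          · intro h
            have heq := pvTags_antiprefix (('<' :: tag'), esc) hmem p (hpre_mem p hp) h
            exact hnotpre (heq ▸ htagpre)
        have h1 : pvChain pre (('<' :: tag') ++ rest) = ('<' :: tag') ++ pvChain pre rest :=
          pvChain_pass_tag pre (fun p hp => (pvTags_shape p (hpre_mem p hp)).1)
            ('<' :: tag') (by simp) (by simpa using hshape.2.2.1) hnp_pre rest
        have h2 : pvRep ('<' :: tag') esc (('<' :: tag') ++ pvChain pre rest) =
            esc ++ pvRep ('<' :: tag') esc (pvChain pre rest) := by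
          rw [List.cons_append,
            pvRep_pos _ _ _ _ (by rw [← List.cons_append]; exact List.prefix_append _ _)]
          congr 1
          simp
        have hpost_mem : ∀ p ∈ post, p ∈ pvTags := by
          intro p hp; rw [hsplit]; simp [hp]
        have h3 : pvChain post (esc ++ pvRep ('<' :: tag') esc (pvChain pre rest)) =
            esc ++ pvChain post (pvRep ('<' :: tag') esc (pvChain pre rest)) :=
          pvChain_pass_esc post (fun p hp => (pvTags_shape p (hpost_mem p hp)).1)
            esc hshape.2.2.2.2.2 _
        have hrest_len : rest.length ≤ n := by
          have h4 : tag'.length + rest.length = t.length := by rw [← hrest]; simp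
          simp only [List.length_cons] at hl
          omega
        have hchain : pvChain pvTags (c :: t) = esc ++ pvScan rest := by
          rw [hchain_split (c :: t), hct, h1, h2, h3, ← hchain_split rest, ih rest hrest_len]
        rw [hchain]
        simp only [pvScan]
        rw [if_pos hc, hf]
        show esc ++ pvScan rest = esc ++ pvScan (t.drop (('<' :: tag').length - 1))
        rw [hdrop]

-- assemble on strings
theorem pvFinal (s : String) :
    process_raw_action_for_html_py s = process_raw_action_for_html_py_alt s := by
  rw [← String.toList_inj]
  simp only [process_raw_action_for_html_py, process_raw_action_for_html_py_alt,
    PySem.Str.toList_replace]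
  rw [pvReplace_eq _ _ _ (by decide), pvReplace_eq _ _ _ (by decide),
      pvReplace_eq _ _ _ (by decide), pvReplace_eq _ _ _ (by decide),
      pvReplace_eq _ _ _ (by decide), pvReplace_eq _ _ _ (by decide)]
  have h := pvMain s.toList.length s.toList (le_refl _)
  simp only [pvChain, pvTags, List.foldl_cons, List.foldl_nil] at h
  rw [h]
  simp

-- ===== VERDICT (by name: the statement is the Claim_ definition above) =====
theorem process_raw_action_for_html_py_spec : Claim_equal_process_raw_action_for_html_py := by
  intro s _
  unfold Spec_process_raw_action_for_html_py
  exact pvFinal s
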